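-- pv_equiv track=rewrite | github.com/Lantuu/perf_code | perf_code/parseAPILog/backup2.py | split_diff
-- ===== SOURCE A (Python) =====
-- def split_diff(diff):
--     """
--     以@@ -70,7 +70,7 @@ ... 形式分割diff
--     :param diff: list, 改动的日志
--     :return: list[list[],] 双重列表，
--     """
--     diff_list = []
--     temp_diff = list()
--     for line in diff:
--         if str(line).startswith("@@ "):
--             if len(temp_diff) != 0:
--                 diff_list.append(temp_diff)
--                 temp_diff = list()
--             temp_diff.append(line)
--         else:
--             temp_diff.append(line)
--     diff_list.append(temp_diff)
--     return diff_list
-- ===== SOURCE B (Python) =====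
-- def split_diff(diff):
--     lines = list(diff)
--     cuts = [0] + [i for i, line in enumerate(lines)
--                   if str(line).startswith("@@ ") and i != 0]
--     return [lines[a:b] for a, b in zip(cuts, cuts[1:])] + [lines[cuts[-1]:]]
-- ===== Notes on version B (the rewrite author's own statement) =====
-- stated objective: alternative
-- what changed: A builds the groups with a streaming accumulator (flush temp_diff at each '@@ ' marker); B first collects the positive marker indices in one enumerate pass and then produces the groups by slicing between consecutive cut points.
import Mathlib
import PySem

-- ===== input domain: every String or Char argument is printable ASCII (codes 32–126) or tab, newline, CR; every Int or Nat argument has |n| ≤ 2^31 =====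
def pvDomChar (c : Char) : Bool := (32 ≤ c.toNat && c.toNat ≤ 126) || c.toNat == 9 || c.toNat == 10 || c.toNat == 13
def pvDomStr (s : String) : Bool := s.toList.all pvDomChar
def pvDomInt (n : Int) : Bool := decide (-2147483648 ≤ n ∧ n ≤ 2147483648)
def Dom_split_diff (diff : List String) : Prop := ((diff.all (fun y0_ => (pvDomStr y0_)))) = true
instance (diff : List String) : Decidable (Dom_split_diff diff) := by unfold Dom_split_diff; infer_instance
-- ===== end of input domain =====

-- B replaces A's streaming accumulator with an index-then-slice decomposition (collect marker
-- indices in one pass, then slice between consecutive cut points); objective: alternative decomposition.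

-- ===== PORT A =====
-- A's loop body, state = (diff_list, temp_diff), branches in A's order
def pvStep (st : List (List String) × List String) (line : String) : List (List String) × List String :=
  if PySem.Str.startswith line "@@ " then
    if st.2.length ≠ 0 then
      (st.1 ++ [st.2], [] ++ [line])
    else
      (st.1, st.2 ++ [line])
  else
    (st.1, st.2 ++ [line])

-- literal transliteration of A
def split_diff (diff : List String) : List (List String) :=
  let st := diff.foldl pvStep ([], [])
  st.1 ++ [st.2]

-- ===== PORT B =====
-- literal transliteration of Source B: marker indices (excluding 0), cuts = 0 :: marks,
-- groups = slices between consecutive cuts plus the final open slice.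
-- cuts is nonempty by construction (it starts with 0), so Python's cuts[-1] is getLastD 0.
def split_diff_alt (diff : List String) : List (List String) :=
  let lines := diff
  let cuts : List Int := 0 :: (PySem.List.enumerate lines 0).filterMap
      (fun p => if PySem.Str.startswith p.2 "@@ " ∧ p.1 ≠ 0 then some p.1 else none)
  (cuts.zip cuts.tail).map (fun p => PySem.List.slice lines (some p.1) (some p.2))
    ++ [PySem.List.slice lines (some (cuts.getLastD 0)) none]

-- ===== PRECONDITION & SPEC =====
def Spec_split_diff (diff : List String) (out : List (List String)) : Prop := out = split_diff_alt diff
instance (diff : List String) (out : List (List String)) : Decidable (Spec_split_diff diff out) := by unfold Spec_split_diff; infer_instance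

-- ===== CLAIM (what is proved, stated in full; the proofs are below) =====
def Claim_equal_split_diff : Prop := ∀ (diff : List String), Dom_split_diff diff → Spec_split_diff diff (split_diff diff)

-- ===== LEMMAS AND PROOFS =====

-- marker predicate
def pvP (s : String) : Bool := PySem.Str.startswith s "@@ "

-- recursive reference semantics of A's loop
def pvGo (temp : List String) : List String → List (List String)
  | [] => [temp]
  | x :: xs => if pvP x ∧ temp ≠ [] then temp :: pvGo [x] xs else pvGo (temp ++ [x]) xs

-- all marker indices of xs
def pvMk : List String → List Nat
  | [] => []
  | x :: xs => (if pvP x then [0] else []) ++ (pvMk xs).map (· + 1)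

-- the positive marker indices = B's cut points (after the leading 0)
def pvCuts (xs : List String) : List Nat := (pvMk xs).filter (· ≠ 0)

-- chop lines at relative cut positions, with a pending prefix
def pvChop (pre lines : List String) : List Nat → List (List String)
  | [] => [pre ++ lines]
  | c :: cs => (pre ++ lines.take c) :: pvChop [] (lines.drop c) (cs.map (· - c))
termination_by cs => cs.length
decreasing_by simp

theorem pvStep_marker_flush (acc : List (List String)) (temp : List String) (x : String)
    (hp : pvP x = true) (ht : temp ≠ []) : pvStep (acc, temp) x = (acc ++ [temp], [x]) := by
  unfold pvP at hp
  have hlen : temp.length ≠ 0 := by simpa using ht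
  show (if PySem.Str.startswith x "@@ " = true then
      if temp.length ≠ 0 then (acc ++ [temp], [] ++ [x]) else (acc, temp ++ [x])
    else (acc, temp ++ [x])) = (acc ++ [temp], [x])
  rw [if_pos hp, if_pos hlen]
  simp

theorem pvStep_marker_empty (acc : List (List String)) (x : String)
    (hp : pvP x = true) : pvStep (acc, ([] : List String)) x = (acc, [x]) := by
  unfold pvP at hp
  show (if PySem.Str.startswith x "@@ " = true then
      if ([] : List String).length ≠ 0 then (acc ++ [[]], [] ++ [x]) else (acc, [] ++ [x])
    else (acc, [] ++ [x])) = (acc, [x])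
  rw [if_pos hp, if_neg (by simp)]
  simp

theorem pvStep_plain (acc : List (List String)) (temp : List String) (x : String)
    (hp : ¬ pvP x = true) : pvStep (acc, temp) x = (acc, temp ++ [x]) := by
  unfold pvP at hp
  show (if PySem.Str.startswith x "@@ " = true then
      if temp.length ≠ 0 then (acc ++ [temp], [] ++ [x]) else (acc, temp ++ [x])
    else (acc, temp ++ [x])) = (acc, temp ++ [x])
  rw [if_neg hp]

theorem pvA_fold (xs : List String) : ∀ (acc : List (List String)) (temp : List String),
    (xs.foldl pvStep (acc, temp)).1 ++ [(xs.foldl pvStep (acc, temp)).2]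
    = acc ++ pvGo temp xs := by
  induction xs with
  | nil => intro acc temp; simp [pvGo]
  | cons x xs ih =>
    intro acc temp
    rw [List.foldl_cons]
    by_cases hp : pvP x
    · by_cases ht : temp = []
      · subst ht
        rw [pvStep_marker_empty acc x hp, ih]
        simp [pvGo]
      · rw [pvStep_marker_flush acc temp x hp ht, ih]
        rw [show pvGo temp (x :: xs) = temp :: pvGo [x] xs by
          simp only [pvGo]; rw [if_pos ⟨hp, ht⟩]]
        simp
    · rw [pvStep_plain acc temp x hp, ih]
      rw [show pvGo temp (x :: xs) = pvGo (temp ++ [x]) xs by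
        simp only [pvGo]; rw [if_neg (by simp [hp])]]

theorem pvA_eq_go (diff : List String) : split_diff diff = pvGo [] diff := by
  unfold split_diff
  simpa using pvA_fold diff [] []

-- shifting one line into the prefix
theorem pvChop_shift (cs : List Nat) (pre : List String) (x : String) (xs : List String) :
    pvChop pre (x :: xs) (cs.map (· + 1)) = pvChop (pre ++ [x]) xs cs := by
  cases cs with
  | nil => simp [pvChop]
  | cons c cs' =>
    rw [List.map_cons]
    rw [pvChop, pvChop]
    congr 1
    · simp
    · congr 1
      rw [List.map_map]
      apply List.map_congr_left
      intro a _
      simp only [Function.comp_apply]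
      omega

theorem pvGo_eq_chop (xs : List String) : ∀ (pre : List String), pre ≠ [] →
    pvGo pre xs = pvChop pre xs (pvMk xs) := by
  induction xs with
  | nil =>
    intro pre _
    rw [show pvMk [] = [] from rfl, pvChop]
    simp [pvGo]
  | cons x xs ih =>
    intro pre hpre
    have hsub0 : ∀ l : List Nat, l.map (· - 0) = l := fun l => by simp
    by_cases hp : pvP x
    · rw [show pvGo pre (x :: xs) = pre :: pvGo [x] xs by
        simp only [pvGo]; rw [if_pos ⟨hp, hpre⟩]]
      rw [show pvMk (x :: xs) = 0 :: (pvMk xs).map (· + 1) by simp [pvMk, hp]]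
      rw [pvChop]
      rw [hsub0]
      simp only [List.take_zero, List.append_nil, List.drop_zero]
      congr 1
      rw [pvChop_shift, List.nil_append, ih [x] (by simp)]
    · rw [show pvGo pre (x :: xs) = pvGo (pre ++ [x]) xs by
        simp only [pvGo]; rw [if_neg (by simp [hp])]]
      rw [show pvMk (x :: xs) = (pvMk xs).map (· + 1) by simp [pvMk, hp]]
      rw [pvChop_shift, ih (pre ++ [x]) (by simp)]

theorem pvCuts_cons (x : String) (xs : List String) :
    pvCuts (x :: xs) = (pvMk xs).map (· + 1) := by
  unfold pvCuts
  rw [show pvMk (x :: xs) = (if pvP x then [0] else []) ++ (pvMk xs).map (· + 1) from rfl]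
  rw [List.filter_append]
  have h1 : ((pvMk xs).map (· + 1)).filter (· ≠ 0) = (pvMk xs).map (· + 1) := by
    apply List.filter_eq_self.mpr
    intro a ha
    simp only [List.mem_map] at ha
    obtain ⟨b, _, rfl⟩ := ha
    simp
  rw [h1]
  by_cases hp : pvP x <;> simp [hp]

theorem pvGo_nil_eq_chop (diff : List String) :
    pvGo [] diff = pvChop [] diff (pvCuts diff) := by
  cases diff with
  | nil =>
    rw [show pvCuts [] = [] from rfl, pvChop]
    simp [pvGo]
  | cons x xs =>
    have hgo : pvGo [] (x :: xs) = pvGo [x] xs := by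
      simp only [pvGo]
      rw [if_neg (by simp)]
      simp
    rw [hgo, pvCuts_cons, pvChop_shift, List.nil_append,
        pvGo_eq_chop xs [x] (by simp)]

-- pvMk is strictly increasing
theorem pvMk_pairwise (xs : List String) : (pvMk xs).Pairwise (· < ·) := by
  induction xs with
  | nil => simp [pvMk]
  | cons x xs ih =>
    rw [show pvMk (x :: xs) = (if pvP x then [0] else []) ++ (pvMk xs).map (· + 1) from rfl]
    apply List.pairwise_append.mpr
    refine ⟨?_, List.Pairwise.map _ (fun {a b} h => by omega) ih, ?_⟩
    · by_cases hp : pvP x <;> simp [hp]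
    · intro a ha b hb
      by_cases hp : pvP x <;> simp [hp] at ha
      subst ha
      simp only [List.mem_map] at hb
      obtain ⟨c, _, rfl⟩ := hb
      omega

theorem pvCuts_pairwise (xs : List String) : (pvCuts xs).Pairwise (· < ·) :=
  List.Pairwise.filter _ (pvMk_pairwise xs)

-- B's marker-index pass computes the positive marker indices
theorem pvMarks_eq (xs : List String) : ∀ (s : Nat),
    (PySem.List.enumerate xs (s : Int)).filterMap
      (fun p => if PySem.Str.startswith p.2 "@@ " ∧ p.1 ≠ 0 then some p.1 else none)
    = ((((pvMk xs).map (· + s)).filter (· ≠ 0)).map (fun n : Nat => (n : Int))) := by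
  induction xs with
  | nil => intro s; simp [PySem.List.enumerate_nil, pvMk]
  | cons x xs ih =>
    intro s
    rw [PySem.List.enumerate_cons]
    have hcast : (s : Int) + 1 = ((s + 1 : Nat) : Int) := by push_cast; ring
    have htail : (((pvMk xs).map (· + 1)).map (· + s)) = (pvMk xs).map (· + (s + 1)) := by
      rw [List.map_map]; apply List.map_congr_left; intro a _; simp; omega
    rw [show pvMk (x :: xs) = (if pvP x then [0] else []) ++ (pvMk xs).map (· + 1) from rfl]
    rw [List.map_append, htail, List.filter_append, List.map_append]
    by_cases hp : pvP x
    · have hp' : PySem.Str.startswith x "@@ " = true := hp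
      by_cases hs : s = 0
      · subst hs
        rw [List.filterMap_cons_none (by
          show (if PySem.Str.startswith x "@@ " = true ∧ ((0 : Nat) : Int) ≠ 0
              then some ((0 : Nat) : Int) else none) = none
          rw [if_neg (by simp)])]
        rw [hcast, ih 1]
        rw [show (if pvP x = true then [0] else ([] : List Nat)) = [0] from if_pos hp]
        simp
      · rw [List.filterMap_cons_some (b := (s : Int)) (by
          show (if PySem.Str.startswith x "@@ " = true ∧ (s : Int) ≠ 0
              then some ((s : Int)) else none) = some (s : Int)
          rw [if_pos ⟨hp', by exact_mod_cast hs⟩])]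
        rw [hcast, ih (s + 1)]
        rw [show (if pvP x = true then [0] else ([] : List Nat)) = [0] from if_pos hp]
        simp [hs]
    · have hp' : ¬ PySem.Str.startswith x "@@ " = true := hp
      rw [List.filterMap_cons_none (by
        show (if PySem.Str.startswith x "@@ " = true ∧ (s : Int) ≠ 0
            then some ((s : Int)) else none) = none
        rw [if_neg (fun h => hp' h.1)])]
      rw [hcast, ih (s + 1)]
      rw [show (if pvP x = true then [0] else ([] : List Nat)) = [] from if_neg hp]
      simp

theorem pvGetLastD_map_cast (l : List Nat) : ∀ (d : Nat),
    ((l.map (fun n : Nat => (n : Int))).getLastD (d : Int)) = ((l.getLastD d : Nat) : Int) := by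
  induction l with
  | nil => intro d; simp
  | cons a l ih => intro d; rw [List.map_cons, List.getLastD_cons, List.getLastD_cons, ih a]

-- the zip-slice construction equals pvChop (absolute-index form with offset c)
theorem pvZip_slice (cs : List Nat) : ∀ (c : Nat) (lines : List String),
    (∀ a ∈ cs, c ≤ a) → cs.Pairwise (· < ·) →
    ((((c :: cs).map (fun n : Nat => (n : Int))).zip (cs.map (fun n : Nat => (n : Int)))).map
        (fun p => PySem.List.slice lines (some p.1) (some p.2)))
      ++ [PySem.List.slice lines (some (((c :: cs).getLastD 0 : Nat) : Int)) none]
    = pvChop [] (lines.drop c) (cs.map (· - c)) := by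
  induction cs with
  | nil =>
    intro c lines _ _
    rw [show ((([c] : List Nat).getLastD 0 : Nat)) = c from rfl]
    rw [show ([] : List Nat).map (· - c) = [] from rfl, pvChop]
    simp [PySem.List.slice_from_natCast]
  | cons c1 cs' ih =>
    intro c lines hle hpw
    have hc1 : c ≤ c1 := hle c1 (by simp)
    have hle' : ∀ a ∈ cs', c1 ≤ a := by
      intro a ha
      have := (List.pairwise_cons.mp hpw).1 a ha
      omega
    have hpw' : cs'.Pairwise (· < ·) := (List.pairwise_cons.mp hpw).2
    have hlast : (c :: c1 :: cs').getLastD 0 = (c1 :: cs').getLastD 0 := by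
      simp only [List.getLastD_cons]
    rw [List.map_cons, List.map_cons, List.zip_cons_cons, List.map_cons, List.cons_append, hlast]
    rw [show PySem.List.slice lines (some ((c : Nat) : Int)) (some ((c1 : Nat) : Int))
        = (lines.drop c).take (c1 - c) from PySem.List.slice_natCast lines c c1]
    have htail := ih c1 lines hle' hpw'
    rw [List.map_cons] at htail
    rw [htail]
    rw [show (c1 :: cs').map (· - c) = (c1 - c) :: cs'.map (· - c) from rfl]
    rw [show pvChop [] (lines.drop c) ((c1 - c) :: cs'.map (· - c))
        = ([] ++ (lines.drop c).take (c1 - c)) ::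
            pvChop [] ((lines.drop c).drop (c1 - c)) ((cs'.map (· - c)).map (· - (c1 - c))) by rw [pvChop]]
    have e1 : (lines.drop c).drop (c1 - c) = lines.drop c1 := by
      rw [List.drop_drop]; congr 1; omega
    have e2 : (cs'.map (· - c)).map (· - (c1 - c)) = cs'.map (· - c1) := by
      rw [List.map_map]
      apply List.map_congr_left
      intro a ha
      have := hle' a ha
      simp only [Function.comp_apply]
      omega
    rw [e1, e2]
    simp

theorem pvB_eq_chop (diff : List String) :
    split_diff_alt diff = pvChop [] diff (pvCuts diff) := by
  unfold split_diff_alt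
  simp only
  have hmk := pvMarks_eq diff 0
  simp only [Nat.cast_zero] at hmk
  have h0 : ((pvMk diff).map (· + 0)) = pvMk diff := by simp
  rw [h0] at hmk
  rw [hmk]
  rw [show ((0 : Int) :: (((pvMk diff).filter (· ≠ 0)).map (fun n : Nat => (n : Int))))
      = ((0 :: pvCuts diff).map (fun n : Nat => (n : Int))) by simp [pvCuts]]
  rw [show ((0 :: pvCuts diff).map (fun n : Nat => (n : Int))).tail
      = (pvCuts diff).map (fun n : Nat => (n : Int)) by simp]
  rw [show ((0 : Int)) = (((0 : Nat) : Nat) : Int) by norm_num]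
  rw [pvGetLastD_map_cast (0 :: pvCuts diff) 0]
  have hz := pvZip_slice (pvCuts diff) 0 diff (by intro a _; omega) (pvCuts_pairwise diff)
  rw [List.drop_zero] at hz
  rw [show (pvCuts diff).map (· - 0) = pvCuts diff by simp] at hz
  rw [List.map_cons, Nat.cast_zero] at hz ⊢
  exact hz

-- ===== VERDICT (by name: the statement is the Claim_ definition above) =====
theorem split_diff_spec : Claim_equal_split_diff := by
  intro diff _
  unfold Spec_split_diff
  rw [pvA_eq_go, pvGo_nil_eq_chop, pvB_eq_chop]
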